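-- pv_equiv track=rewrite | github.com/Ashley-Lab/Ashley | commands/rpg/box.py | verify_money
-- ===== SOURCE A (Python) =====
-- def verify_money(money, num, price):
--     cont = 0
--     for _ in range(num):
--         if money > price:
--             cont += 1
--             money -= 500
--         else:
--             pass
--     return cont
-- ===== SOURCE B (Python) =====
-- def verify_money(money, num, price):
--     # Closed form: money > price stays true for exactly ceil((money-price)/500)
--     # iterations (money drops by 500 each time), capped by the number of loop turns.
--     return max(0, min(num, -((price - money) // 500)))
-- ===== Notes on version B (the rewrite author's own statement) =====
-- stated objective: faster
-- what changed: Replaced the O(num) decrement loop with a closed-form ceiling-division formula max(0, min(num, ceil((money-price)/500))).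
import Mathlib
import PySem

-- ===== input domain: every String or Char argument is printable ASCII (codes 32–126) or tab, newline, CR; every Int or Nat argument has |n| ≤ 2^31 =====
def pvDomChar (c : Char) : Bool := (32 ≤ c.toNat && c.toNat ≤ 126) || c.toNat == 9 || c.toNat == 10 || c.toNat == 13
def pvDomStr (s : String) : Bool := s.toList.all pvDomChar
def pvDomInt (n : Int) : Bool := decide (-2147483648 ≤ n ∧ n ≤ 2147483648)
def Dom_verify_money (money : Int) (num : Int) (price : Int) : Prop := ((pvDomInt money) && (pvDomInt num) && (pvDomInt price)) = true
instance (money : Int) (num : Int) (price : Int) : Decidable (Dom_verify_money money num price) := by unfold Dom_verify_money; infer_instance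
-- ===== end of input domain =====

-- B replaces A's O(num) decrement loop by the closed form max(0, min(num, ceil((money-price)/500))).

-- ===== PORT A =====
def verify_money (money : Int) (num : Int) (price : Int) : Int :=
  ((PySem.List.pyRange 0 num 1).foldl
    (fun (s : Int × Int) _ => if s.2 > price then (s.1 + 1, s.2 - 500) else s)
    (0, money)).1

-- ===== PORT B =====
def verify_money_alt (money : Int) (num : Int) (price : Int) : Int :=
  max 0 (min num (-(PySem.Int.floordiv (price - money) 500)))

-- ===== PRECONDITION & SPEC =====
def Spec_verify_money (money : Int) (num : Int) (price : Int) (out : Int) : Prop := out = verify_money_alt money num price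
instance (money : Int) (num : Int) (price : Int) (out : Int) : Decidable (Spec_verify_money money num price out) := by unfold Spec_verify_money; infer_instance

-- ===== CLAIM (what is proved, stated in full; the proofs are below) =====
def Claim_equal_verify_money : Prop := ∀ (money : Int) (num : Int) (price : Int), Dom_verify_money money num price → Spec_verify_money money num price (verify_money money num price)

-- ===== LEMMAS AND PROOFS =====

-- The loop body ignores the list element, so the fold depends only on the length.
theorem verify_money_loop (price : Int) : ∀ (l : List Int) (c m : Int),
    (l.foldl (fun (s : Int × Int) _ => if s.2 > price then (s.1 + 1, s.2 - 500) else s) (c, m)).1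
      = c + min (l.length : Int) (max 0 (-((price - m) / 500))) := by
  intro l
  induction l with
  | nil => intro c m; simp
  | cons x xs ih =>
    intro c m
    simp only [List.foldl_cons, List.length_cons]
    by_cases h : m > price
    · rw [if_pos h, ih]
      push_cast
      omega
    · rw [if_neg h, ih]
      push_cast
      omega

-- ===== VERDICT (by name: the statement is the Claim_ definition above) =====
theorem verify_money_spec : Claim_equal_verify_money := by
  intro money num price _
  unfold Spec_verify_money verify_money verify_money_alt
  rw [verify_money_loop, PySem.Int.floordiv_eq_ediv_of_pos (by norm_num),
      PySem.List.length_pyRange_one]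
  omega
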